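-- pv_equiv track=rewrite | github.com/ag93/Leetcode | HashMap.py | hashMap
-- ===== SOURCE A (Python) =====
-- def hashMap(queryType, query):
--     keys = []
--     values = []
--     res = 0
--
--     for typ, val in zip(queryType, query):
--         if typ == "insert":
--             keys.append(val[0])
--             values.append(val[1])
--
--         elif typ == "addToValue":
--             #res2 = [x + val[0] for x in values]
--             #values = res2
--
--             for i in range(len(values)):
--                 values[i] += val[0]
--
--
--         elif typ == "addToKey":
--             #res1 = [x + val[0] for x in keys]
--             #keys = res1
--
--             for i in range(len(keys)):
--                 keys[i] += val[0]
--
--         elif typ == "get":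
--             '''if (len(keys) != 0 and len(values) != 0):
--                 for i in range(0, len(keys)):
--                     if keys[i] == val[0]:
--                         res+=values[i]'''
--
--             res += values[keys.index(val[0])]
--
--     return(res)
-- ===== SOURCE B (Python) =====
-- def hashMap(queryType, query):
--     d = {}
--     koff = 0
--     voff = 0
--     res = 0
--     for typ, val in zip(queryType, query):
--         if typ == "insert":
--             d.setdefault(val[0] - koff, val[1] - voff)
--         elif typ == "addToValue":
--             voff += val[0]
--         elif typ == "addToKey":
--             koff += val[0]
--         elif typ == "get":
--             res += d[val[0] - koff] + voff
--     return res
-- ===== Notes on version B (the rewrite author's own statement) =====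
-- stated objective: alternative
-- what changed: Replaces A's parallel key/value lists, which are rewritten in full on every addToKey/addToValue and scanned by list.index on every get, with a dict of offset-normalised keys plus two global offsets maintained in O(1) per operation.
-- outside the precondition, e.g. on hashMap(['addToKey'], [[]]): A returns 0, B raises IndexError; on hashMap(['addToValue', 'insert', 'get'], [[], [1, 2], [1]]): A returns 2, B raises IndexError
import Mathlib
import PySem

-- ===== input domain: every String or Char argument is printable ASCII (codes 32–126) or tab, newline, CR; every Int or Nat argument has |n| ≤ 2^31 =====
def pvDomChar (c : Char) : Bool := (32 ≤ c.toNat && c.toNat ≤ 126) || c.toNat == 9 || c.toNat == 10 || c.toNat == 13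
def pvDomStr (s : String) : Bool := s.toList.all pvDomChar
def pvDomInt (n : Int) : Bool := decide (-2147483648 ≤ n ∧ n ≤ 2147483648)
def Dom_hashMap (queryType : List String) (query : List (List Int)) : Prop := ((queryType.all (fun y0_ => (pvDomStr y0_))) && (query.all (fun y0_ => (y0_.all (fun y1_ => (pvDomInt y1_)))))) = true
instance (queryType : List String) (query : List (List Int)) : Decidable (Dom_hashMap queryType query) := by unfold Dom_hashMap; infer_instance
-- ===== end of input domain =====

-- B replaces A's parallel key/value lists (rewritten in full on every addToKey/addToValue and
-- scanned by list.index on every get) by a dict of offset-normalised keys plus two global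
-- offsets maintained per operation: a different data structure and traversal (objective 'alternative').

-- ===== PORT A =====
-- One step of A's loop body; `none` = the Python raises at this step.
-- State: (keys, values, res). The `= []` guards mirror `for i in range(len(...))`
-- running zero iterations (so `val[0]` is never evaluated) on an empty list.
def hashMapStepA (s : List Int × List Int × Int) (op : String × List Int) :
    Option (List Int × List Int × Int) :=
  match s, op with
  | (keys, values, res), (typ, val) =>
    if typ = "insert" then
      match PySem.List.pyGet? val 0 with
      | none => none
      | some k =>
        match PySem.List.pyGet? val 1 with
        | none => none
        | some v => some (keys ++ [k], values ++ [v], res)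
    else if typ = "addToValue" then
      if values = [] then some (keys, values, res)
      else
        match PySem.List.pyGet? val 0 with
        | none => none
        | some a => some (keys, values.map (fun x => x + a), res)
    else if typ = "addToKey" then
      if keys = [] then some (keys, values, res)
      else
        match PySem.List.pyGet? val 0 with
        | none => none
        | some a => some (keys.map (fun x => x + a), values, res)
    else if typ = "get" then
      match PySem.List.pyGet? val 0 with
      | none => none
      | some q =>
        match PySem.List.index? keys q with
        | none => none
        | some i =>
          match PySem.List.pyGet? values (i : Int) with
          | none => none
          | some v => some (keys, values, res + v)
    else some (keys, values, res)

def hashMap (queryType : List String) (query : List (List Int)) : Int :=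
  (((queryType.zip query).foldl (fun acc op => acc.bind (fun st => hashMapStepA st op))
      (some (([] : List Int), ([] : List Int), (0 : Int)))).map (fun st => st.2.2)).getD 0

-- ===== PORT B =====
-- B's loop, transcribed as structural recursion on the remaining operations, carrying the
-- dict and the three integer accumulators directly; `none` = B's Python raises at this step
-- (val[0]/val[1] on a too-short row = IndexError, d[..] on a missing key = KeyError).
def hashMapGo (ops : List (String × List Int)) (d : PySem.Dict Int Int)
    (koff voff res : Int) : Option Int :=
  match ops with
  | [] => some res
  | (typ, val) :: rest =>
    if typ = "insert" then
      match val with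
      | k :: v :: _ => hashMapGo rest (d.setdefault (k - koff) (v - voff)) koff voff res
      | _ => none
    else if typ = "addToValue" then
      match val with
      | a :: _ => hashMapGo rest d koff (voff + a) res
      | [] => none
    else if typ = "addToKey" then
      match val with
      | a :: _ => hashMapGo rest d (koff + a) voff res
      | [] => none
    else if typ = "get" then
      match val with
      | q :: _ =>
        match d.get? (q - koff) with
        | some w => hashMapGo rest d koff voff (res + w + voff)
        | none => none
      | [] => none
    else hashMapGo rest d koff voff res

def hashMap_alt (queryType : List String) (query : List (List Int)) : Int :=
  (hashMapGo (queryType.zip query) PySem.Dict.empty 0 0 0).getD 0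

-- ===== PRECONDITION & SPEC =====
-- Sum of the addToKey amounts among the first m operations.
def hashMapKsum (queryType : List String) (query : List (List Int)) (m : Nat) : Int :=
  (((List.range m).filter (fun j => queryType.getD j "" == "addToKey")).map
    (fun j => (query.getD j []).getD 0 0)).sum

-- Pre_ excludes (a) every input on which A raises (a too-short query row whose element A reads,
-- or a get whose key is not present at that moment), and (b) addToValue/addToKey operations with
-- an EMPTY query row arriving while the map is still empty: there A's inner loop runs zero times,
-- never evaluates val[0] and A returns, while B's natural code reads val[0] and raises IndexError.
def Pre_hashMap (queryType : List String) (query : List (List Int)) : Prop :=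
  ∀ i < min queryType.length query.length,
    (queryType.getD i "" = "insert" → 2 ≤ (query.getD i []).length) ∧
    ((queryType.getD i "" = "addToValue" ∨ queryType.getD i "" = "addToKey") →
      1 ≤ (query.getD i []).length) ∧
    (queryType.getD i "" = "get" →
      1 ≤ (query.getD i []).length ∧
      ∃ j < i, queryType.getD j "" = "insert" ∧
        (query.getD i []).getD 0 0 =
          (query.getD j []).getD 0 0 +
            (hashMapKsum queryType query i - hashMapKsum queryType query (j + 1)))

instance (queryType : List String) (query : List (List Int)) :
    Decidable (Pre_hashMap queryType query) := by unfold Pre_hashMap; infer_instance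

def pvWitness_hashMap : List String × List (List Int) :=
  (["insert", "addToKey", "get"], [[1, 5], [2], [3]])

def Spec_hashMap (queryType : List String) (query : List (List Int)) (out : Int) : Prop :=
  out = hashMap_alt queryType query
instance (queryType : List String) (query : List (List Int)) (out : Int) :
    Decidable (Spec_hashMap queryType query out) := by unfold Spec_hashMap; infer_instance

-- ===== CLAIM (what is proved, stated in full; the proofs are below) =====
def Claim_equal_hashMap : Prop := ∀ (queryType : List String) (query : List (List Int)), Dom_hashMap queryType query → Pre_hashMap queryType query → Spec_hashMap queryType query (hashMap queryType query)

-- ===== LEMMAS AND PROOFS =====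

-- The only per-operation fact the equivalence proof needs from Pre_:
-- addToValue/addToKey rows are nonempty.
def hashMapOkOp (op : String × List Int) : Prop :=
  (op.1 = "addToValue" ∨ op.1 = "addToKey") → op.2 ≠ []

-- Invariant tying A's state to B's dict and offsets.
def hashMapRel (a : List Int × List Int × Int)
    (d : PySem.Dict Int Int) (koff voff res : Int) : Prop :=
  a.1.length = a.2.1.length ∧ a.2.2 = res ∧
  ∀ x : Int, d.get? x =
    ((PySem.List.index? a.1 (x + koff)).bind (fun i => a.2.1[i]?)).map (fun v => v - voff)

theorem hashMap_index?_map_add (l : List Int) (c x : Int) :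
    PySem.List.index? (l.map (fun y => y + c)) (x + c) = PySem.List.index? l x := by
  induction l with
  | nil => simp [PySem.List.index?]
  | cons h t ih =>
    by_cases hx : h = x
    · subst hx
      rw [List.map_cons, PySem.List.index?_cons_self, PySem.List.index?_cons_self]
    · rw [List.map_cons, PySem.List.index?_cons_of_ne _ (show h + c ≠ x + c by omega),
        PySem.List.index?_cons_of_ne _ hx, ih]

theorem hashMap_idxOf?_map_add (l : List Int) (c x : Int) :
    List.idxOf? (x + c) (l.map (fun y => y + c)) = List.idxOf? x l :=
  hashMap_index?_map_add l c x

theorem hashMap_index?_append_singleton (l : List Int) (k x : Int) :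
    PySem.List.index? (l ++ [k]) x =
      match PySem.List.index? l x with
      | some i => some i
      | none => if x = k then some l.length else none := by
  by_cases hm : x ∈ l
  · rw [PySem.List.index?_append_of_mem _ hm]
    obtain ⟨i, hi⟩ := Option.isSome_iff_exists.mp ((PySem.List.index?_isSome_iff l x).mpr hm)
    rw [hi]
  · have hn : PySem.List.index? l x = none := (PySem.List.index?_eq_none_iff l x).mpr hm
    rw [hn]
    by_cases hk : x = k
    · subst hk
      rw [PySem.List.index?_append_singleton_self l x hm]
      simp
    · have hnm : x ∉ l ++ [k] := by
        simp only [List.mem_append, List.mem_singleton]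
        rintro (h | h)
        · exact hm h
        · exact hk h
      rw [(PySem.List.index?_eq_none_iff (l ++ [k]) x).mpr hnm]
      simp [hk]

theorem hashMap_idxOf?_append_singleton (l : List Int) (k x : Int) :
    List.idxOf? x (l ++ [k]) =
      match List.idxOf? x l with
      | some i => some i
      | none => if x = k then some l.length else none :=
  hashMap_index?_append_singleton l k x

theorem hashMap_idxOf?_lt (l : List Int) (x : Int) (i : Nat)
    (h : List.idxOf? x l = some i) : i < l.length := by
  obtain ⟨hk, -⟩ :=
    PySem.List.getElem_of_index?_eq_some (xs := l) (v := x) (k := i) h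
  exact hk

-- One step: either both sides raise here, or A's step succeeds, B's recursion takes exactly
-- one unfolding, and the invariant is preserved.
theorem hashMap_step_rel (a : List Int × List Int × Int)
    (d : PySem.Dict Int Int) (koff voff resb : Int) (op : String × List Int)
    (rest : List (String × List Int))
    (hrel : hashMapRel a d koff voff resb) (hok : hashMapOkOp op) :
    (hashMapStepA a op = none ∧ hashMapGo (op :: rest) d koff voff resb = none) ∨
      ∃ a' d' koff' voff' resb',
        hashMapStepA a op = some a' ∧
        hashMapGo (op :: rest) d koff voff resb = hashMapGo rest d' koff' voff' resb' ∧
        hashMapRel a' d' koff' voff' resb' := by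
  obtain ⟨keys, values, res⟩ := a
  obtain ⟨typ, val⟩ := op
  obtain ⟨hlen, hres, hdict⟩ := hrel
  simp only [hashMapRel] at hlen hres hdict ⊢
  dsimp at hlen hres hdict
  by_cases h1 : typ = "insert"
  · -- insert
    simp only [hashMapStepA, hashMapGo, if_pos h1]
    match val with
    | [] => exact Or.inl ⟨by simp [PySem.List.pyGet?], rfl⟩
    | [k] =>
      refine Or.inl ⟨?_, rfl⟩
      rw [PySem.List.pyGet?_zero_cons]
      simp [PySem.List.pyGet?, PySem.List.pyIdx?]
    | k :: v :: tl =>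
      have hg1 : PySem.List.pyGet? (k :: v :: tl) 1 = some v := by
        simp [PySem.List.pyGet?, PySem.List.pyIdx?]
      rw [PySem.List.pyGet?_zero_cons, hg1]
      refine Or.inr ⟨_, _, _, _, _, rfl, rfl, ?_, ?_, ?_⟩
      · simp [hlen]
      · exact hres
      · intro x
        dsimp only
        simp only [PySem.List.index?_eq_idxOf?]
        rw [hashMap_idxOf?_append_singleton]
        by_cases hxk : x + koff = k
        · have hx : x = k - koff := by omega
          subst hx
          by_cases hc : d.contains (k - koff) = true
          · rw [PySem.Dict.setdefault_of_contains d _ hc]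
            have := hdict (k - koff)
            cases hidx : List.idxOf? (k - koff + koff) keys with
            | none =>
              rw [hidx] at this
              simp only [Option.bind_none, Option.map_none] at this
              rw [PySem.Dict.contains_eq_isSome_get?] at hc
              rw [this] at hc; simp at hc
            | some i =>
              rw [hidx] at this
              have hilt : i < keys.length := hashMap_idxOf?_lt _ _ _ hidx
              rw [this]
              simp [List.getElem?_append_left (hlen ▸ hilt)]
          · have hc2 : d.contains (k - koff) = false := by simpa using hc
            rw [PySem.Dict.setdefault_of_not_contains d _ hc2, PySem.Dict.get?_insert_self]
            have := hdict (k - koff)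
            cases hidx : List.idxOf? (k - koff + koff) keys with
            | none =>
              have hm : (match (none : Option Nat) with
                  | some i => some i
                  | none => if k - koff + koff = k then some keys.length else none) =
                    some keys.length := by rw [if_pos hxk]
              rw [hm, hlen]
              simp
            | some i =>
              rw [hidx] at this
              have hilt : i < keys.length := hashMap_idxOf?_lt _ _ _ hidx
              rw [PySem.Dict.contains_eq_isSome_get?] at hc
              rw [this] at hc
              simp [hlen ▸ hilt] at hc
        · -- x + koff ≠ k
          have hxne : x ≠ k - koff := by omega
          have hget : (d.setdefault (k - koff) (v - voff)).get? x = d.get? x := by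
            by_cases hc : d.contains (k - koff) = true
            · rw [PySem.Dict.setdefault_of_contains d _ hc]
            · have hc2 : d.contains (k - koff) = false := by simpa using hc
              rw [PySem.Dict.setdefault_of_not_contains d _ hc2,
                PySem.Dict.get?_insert_of_ne d _ hxne]
          rw [hget, hdict x]
          cases hidx : List.idxOf? (x + koff) keys with
          | none => simp [hxk]
          | some i =>
            have hilt : i < keys.length := hashMap_idxOf?_lt _ _ _ hidx
            simp [List.getElem?_append_left (hlen ▸ hilt)]
  · by_cases h2 : typ = "addToValue"
    · have hv : val ≠ [] := hok (Or.inl h2)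
      simp only [hashMapStepA, hashMapGo, if_neg h1, if_pos h2]
      match val, hv with
      | a0 :: tl, _ =>
      rw [PySem.List.pyGet?_zero_cons]
      by_cases hemp : values = []
      · simp only [hemp, if_pos]
        refine Or.inr ⟨_, _, _, _, _, rfl, rfl, ?_, hres, ?_⟩
        · simpa [hemp] using hlen
        · intro x
          dsimp only
          simp only [PySem.List.index?_eq_idxOf?]
          have := hdict x
          cases hidx : List.idxOf? (x + koff) keys with
          | none => simpa [hidx] using this
          | some i =>
            have hilt : i < keys.length := hashMap_idxOf?_lt _ _ _ hidx
            exfalso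
            rw [hemp] at hlen
            simp only [List.length_nil] at hlen
            omega
      · simp only [hemp, ite_false]
        refine Or.inr ⟨_, _, _, _, _, rfl, rfl, ?_, hres, ?_⟩
        · simp [hlen]
        · intro x
          dsimp only
          simp only [PySem.List.index?_eq_idxOf?]
          rw [hdict x]
          cases hidx : List.idxOf? (x + koff) keys with
          | none => simp
          | some i =>
            have hilt : i < keys.length := hashMap_idxOf?_lt _ _ _ hidx
            simp only [Option.bind_some, List.getElem?_map]
            have : i < values.length := hlen ▸ hilt
            simp only [List.getElem?_eq_getElem this, Option.map_some, Option.some.injEq]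
            ring
    · by_cases h3 : typ = "addToKey"
      · have hv : val ≠ [] := hok (Or.inr h3)
        simp only [hashMapStepA, hashMapGo, if_neg h1, if_neg h2, if_pos h3]
        match val, hv with
        | a0 :: tl, _ =>
        rw [PySem.List.pyGet?_zero_cons]
        by_cases hemp : keys = []
        · simp only [hemp, if_pos]
          refine Or.inr ⟨_, _, _, _, _, rfl, rfl, ?_, hres, ?_⟩
          · simpa [hemp] using hlen
          · intro x
            dsimp only
            simp only [PySem.List.index?_eq_idxOf?]
            have hx := hdict x
            rw [hemp] at hx
            simp only [List.idxOf?_nil, Option.bind_none, Option.map_none] at hx ⊢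
            exact hx
        · simp only [hemp, ite_false]
          refine Or.inr ⟨_, _, _, _, _, rfl, rfl, ?_, hres, ?_⟩
          · simp [hlen]
          · intro x
            dsimp only
            simp only [PySem.List.index?_eq_idxOf?]
            have hx : x + (koff + a0) = (x + koff) + a0 := by ring
            rw [hx, hashMap_idxOf?_map_add, hdict x]
      · by_cases h4 : typ = "get"
        · simp only [hashMapStepA, hashMapGo, if_neg h1, if_neg h2, if_neg h3, if_pos h4]
          simp only [PySem.List.index?_eq_idxOf?]
          match val with
          | [] => exact Or.inl ⟨by simp [PySem.List.pyGet?], rfl⟩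
          | q :: tl =>
          rw [PySem.List.pyGet?_zero_cons]
          have hdx := hdict (q - koff)
          have hqk : q - koff + koff = q := by ring
          rw [hqk] at hdx
          cases hidx : List.idxOf? q keys with
          | none =>
            rw [hidx] at hdx
            simp only [Option.bind_none, Option.map_none] at hdx
            refine Or.inl ⟨?_, ?_⟩ <;> simp [hidx, hdx]
          | some i =>
            rw [hidx] at hdx
            have hilt : i < keys.length := hashMap_idxOf?_lt _ _ _ hidx
            have hvlt : i < values.length := hlen ▸ hilt
            simp only [Option.bind_some] at hdx
            rw [List.getElem?_eq_getElem hvlt] at hdx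
            simp only [Option.map_some] at hdx
            simp only [hidx, hdx, PySem.List.pyGet?_natCast,
              List.getElem?_eq_getElem hvlt]
            refine Or.inr ⟨_, _, _, _, _, rfl, rfl, hlen, ?_, hdict⟩
            dsimp only
            rw [hres]; ring
        · simp only [hashMapStepA, hashMapGo, if_neg h1, if_neg h2, if_neg h3, if_neg h4]
          exact Or.inr ⟨_, _, _, _, _, rfl, rfl, hlen, hres, hdict⟩

theorem hashMap_foldA_none (l : List (String × List Int)) :
    l.foldl (fun acc op => acc.bind (fun st => hashMapStepA st op)) none = none := by
  induction l with
  | nil => rfl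
  | cons h t ih => simpa using ih

theorem hashMap_fold_rel (l : List (String × List Int)) :
    ∀ (a : List Int × List Int × Int) (d : PySem.Dict Int Int) (koff voff resb : Int),
      hashMapRel a d koff voff resb → (∀ op ∈ l, hashMapOkOp op) →
      (l.foldl (fun acc op => acc.bind (fun st => hashMapStepA st op)) (some a) = none ∧
        hashMapGo l d koff voff resb = none) ∨
      ∃ a',
        l.foldl (fun acc op => acc.bind (fun st => hashMapStepA st op)) (some a) = some a' ∧
        hashMapGo l d koff voff resb = some a'.2.2 := by
  induction l with
  | nil =>
    intro a d koff voff resb hrel _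
    exact Or.inr ⟨a, rfl, by rw [hashMapGo, hrel.2.1]⟩
  | cons op t ih =>
    intro a d koff voff resb hrel hok
    rcases hashMap_step_rel a d koff voff resb op t hrel (hok op (List.mem_cons_self)) with
      ⟨hA, hB⟩ | ⟨a', d', koff', voff', resb', hA, hB, hrel'⟩
    · simp only [List.foldl_cons, Option.bind_some, hA, hB]
      exact Or.inl ⟨hashMap_foldA_none t, trivial⟩
    · simp only [List.foldl_cons, Option.bind_some, hA, hB]
      exact ih a' d' koff' voff' resb' hrel' (fun o ho => hok o (List.mem_cons_of_mem _ ho))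

theorem hashMap_pre_okOp (queryType : List String) (query : List (List Int))
    (hpre : Pre_hashMap queryType query) :
    ∀ op ∈ queryType.zip query, hashMapOkOp op := by
  intro op hop
  obtain ⟨i, hi, hgi⟩ := List.mem_iff_getElem.mp hop
  have hlen : (queryType.zip query).length = min queryType.length query.length :=
    List.length_zip
  have hi' : i < min queryType.length query.length := hlen ▸ hi
  have hq : i < query.length := lt_of_lt_of_le hi' (min_le_right _ _)
  have ht : i < queryType.length := lt_of_lt_of_le hi' (min_le_left _ _)
  have hz : (queryType.zip query)[i] = (queryType[i], query[i]) := List.getElem_zip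
  rw [hz] at hgi
  obtain ⟨-, h2, -⟩ := hpre i hi'
  intro hcase
  have htd : queryType.getD i "" = op.1 := by
    rw [List.getD_eq_getElem _ _ ht, ← hgi]
  have hqd : query.getD i [] = op.2 := by
    rw [List.getD_eq_getElem _ _ hq, ← hgi]
  rw [htd, hqd] at h2
  have := h2 hcase
  intro hnil
  rw [hnil] at this
  simp at this

-- ===== VERDICT (by name: the statement is the Claim_ definition above) =====
theorem hashMap_spec : Claim_equal_hashMap := by
  unfold Claim_equal_hashMap
  intro queryType query _hdom hpre
  unfold Spec_hashMap hashMap hashMap_alt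
  have hinit : hashMapRel (([] : List Int), ([] : List Int), (0 : Int))
      PySem.Dict.empty 0 0 0 := by
    refine ⟨rfl, rfl, ?_⟩
    intro x
    simp [PySem.List.index?_eq_idxOf?, PySem.Dict.get?_empty]
  rcases hashMap_fold_rel (queryType.zip query) _ _ _ _ _ hinit
      (hashMap_pre_okOp queryType query hpre) with ⟨hA, hB⟩ | ⟨a', hA, hB⟩
  · rw [hA, hB]; rfl
  · rw [hA, hB]; rfl
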